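-- pv_equiv track=rewrite | github.com/Salomao0569/mac-rag-eco | parse.py | is_non_clinical
-- ===== SOURCE A (Python) =====
-- def is_non_clinical(text):
--     """Detect disclosure / references / acknowledgements sections."""
--     skip = (
--         'references', 'acknowledgement', 'disclosure', 'conflict of interest',
--         'supplementary', 'author contribution', 'funding', 'data availability',
--         'article contents', 'cite', 'table of contents', 'share', 'search',
--         'navbar', 'skip to', 'sign in', 'related articles', 'metrics',
--         'responses', 'close', 'pdf', 'permissions', 'reprints',
--     )
--     lower = text.lower()
--     return any(m in lower for m in skip)
-- ===== SOURCE B (Python) =====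
-- # First-letter dispatch table: keyword first char -> tuple of keyword tails.
-- _INDEX = {
--     'r': ('eferences', 'elated articles', 'esponses', 'eprints'),
--     'a': ('cknowledgement', 'uthor contribution', 'rticle contents'),
--     'd': ('isclosure', 'ata availability'),
--     'c': ('onflict of interest', 'ite', 'lose'),
--     's': ('upplementary', 'hare', 'earch', 'kip to', 'ign in'),
--     'f': ('unding',),
--     't': ('able of contents',),
--     'n': ('avbar',),
--     'm': ('etrics',),
--     'p': ('df', 'ermissions'),
-- }
--
--
-- def is_non_clinical(text):
--     """Detect disclosure / references / acknowledgements sections."""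
--     low = text.lower()
--     for i, ch in enumerate(low):
--         for tail in _INDEX.get(ch, ()):
--             if low.startswith(tail, i + 1):
--                 return True
--     return False
-- ===== Notes on version B (the rewrite author's own statement) =====
-- stated objective: alternative
-- what changed: Replaces A's 23 independent full-text substring searches by a single left-to-right pass that, at each position, consults a first-letter dispatch table (keyword first char -> keyword tails) and tests only the tails dispatched on that character.
import Mathlib
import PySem

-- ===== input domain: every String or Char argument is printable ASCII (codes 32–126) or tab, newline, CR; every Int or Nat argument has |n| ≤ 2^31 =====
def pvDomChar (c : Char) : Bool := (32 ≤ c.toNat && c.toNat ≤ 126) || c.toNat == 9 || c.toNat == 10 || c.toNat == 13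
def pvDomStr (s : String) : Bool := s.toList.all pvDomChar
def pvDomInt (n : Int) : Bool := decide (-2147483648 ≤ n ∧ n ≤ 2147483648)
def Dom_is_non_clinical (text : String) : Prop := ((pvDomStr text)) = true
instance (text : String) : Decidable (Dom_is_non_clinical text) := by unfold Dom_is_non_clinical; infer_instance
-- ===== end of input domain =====

-- B replaces A's 23 independent substring searches by one pass over text positions
-- with a first-letter dispatch table mapping a character to the keyword tails to
-- test there (objective: alternative data structure / traversal).


-- ===== PORT A =====
-- A's fixed keyword tuple, verbatim
def skipKeywords : List String :=
  ["references", "acknowledgement", "disclosure", "conflict of interest",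
   "supplementary", "author contribution", "funding", "data availability",
   "article contents", "cite", "table of contents", "share", "search",
   "navbar", "skip to", "sign in", "related articles", "metrics",
   "responses", "close", "pdf", "permissions", "reprints"]

-- any(m in lower for m in skip)
def is_non_clinical (text : String) : Bool :=
  let lower := PySem.Str.lower text
  skipKeywords.any (fun m => PySem.Str.isIn m lower)

-- ===== PORT B =====
-- _INDEX: first letter of a keyword ↦ the tails (rest of each keyword starting there)
def skipIndex : List (Char × List String) :=
  [('r', ["eferences", "elated articles", "esponses", "eprints"]),
   ('a', ["cknowledgement", "uthor contribution", "rticle contents"]),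
   ('d', ["isclosure", "ata availability"]),
   ('c', ["onflict of interest", "ite", "lose"]),
   ('s', ["upplementary", "hare", "earch", "kip to", "ign in"]),
   ('f', ["unding"]),
   ('t', ["able of contents"]),
   ('n', ["avbar"]),
   ('m', ["etrics"]),
   ('p', ["df", "ermissions"])]

-- for i, ch in enumerate(low): for tail in _INDEX.get(ch, ()): if low.startswith(tail, i+1): return True
-- (recursion over the character list: at each char, test the tails dispatched on that char)
def scanIdx : List Char → Bool
  | [] => false
  | c :: t =>
      ((List.lookup c skipIndex).getD []).any (fun tail => tail.toList.isPrefixOf t)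
      || scanIdx t

def is_non_clinical_alt (text : String) : Bool :=
  scanIdx (PySem.Chars.lower text.toList)

-- ===== PRECONDITION & SPEC =====
def Spec_is_non_clinical (text : String) (out : Bool) : Prop := out = is_non_clinical_alt text
instance (text : String) (out : Bool) : Decidable (Spec_is_non_clinical text out) := by unfold Spec_is_non_clinical; infer_instance

-- ===== CLAIM (what is proved, stated in full; the proofs are below) =====
def Claim_equal_is_non_clinical : Prop := ∀ (text : String), Dom_is_non_clinical text → Spec_is_non_clinical text (is_non_clinical text)

-- ===== LEMMAS AND PROOFS =====

-- the keywords spelled out by the index (first letter consed back onto each tail)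
def idxKeywords : List (List Char) :=
  skipIndex.flatMap (fun p => p.2.map (fun s => p.1 :: s.toList))

-- the index spells out exactly A's keyword list (as a set of char lists)
theorem idxKeywords_perm : idxKeywords.Perm (skipKeywords.map String.toList) := by
  decide

-- dispatching on the first character c finds a matching tail iff some index keyword
-- is a prefix of c :: t  (needs the index keys to be pairwise distinct)
theorem lookup_any_iff (l : List (Char × List String))
    (hk : (l.map Prod.fst).Nodup) (c : Char) (t : List Char) :
    (((List.lookup c l).getD []).any (fun tail => tail.toList.isPrefixOf t) = true)
    ↔ ∃ m ∈ l.flatMap (fun p => p.2.map (fun s => p.1 :: s.toList)), m <+: c :: t := by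
  induction l with
  | nil => simp [List.lookup]
  | cons p l ih =>
      rcases p with ⟨k, tails⟩
      simp only [List.map_cons, List.nodup_cons] at hk
      obtain ⟨hknot, hnd⟩ := hk
      rw [List.flatMap_cons]
      by_cases h : c = k
      · subst h
        simp only [List.lookup, beq_self_eq_true, Option.getD_some, List.any_eq_true,
          List.isPrefixOf_iff_prefix]
        constructor
        · rintro ⟨tail, htail, hp⟩
          exact ⟨c :: tail.toList, List.mem_append_left _
            (List.mem_map.mpr ⟨tail, htail, rfl⟩), List.cons_prefix_cons.mpr ⟨rfl, hp⟩⟩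
        · rintro ⟨m, hm, hp⟩
          rcases List.mem_append.mp hm with hm | hm
          · rcases List.mem_map.mp hm with ⟨tail, htail, rfl⟩
            exact ⟨tail, htail, (List.cons_prefix_cons.mp hp).2⟩
          · -- a keyword from the rest of the index starts with a key ≠ c: no match
            rcases List.mem_flatMap.mp hm with ⟨q, hq, hmq⟩
            rcases List.mem_map.mp hmq with ⟨s, _, rfl⟩
            have : q.1 = c := (List.cons_prefix_cons.mp hp).1
            exact absurd (this ▸ List.mem_map.mpr ⟨q, hq, rfl⟩) hknot
      · have hbeq : (c == k) = false := beq_eq_false_iff_ne.mpr h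
        simp only [List.lookup, hbeq]
        rw [ih hnd]
        constructor
        · rintro ⟨m, hm, hp⟩
          exact ⟨m, List.mem_append_right _ hm, hp⟩
        · rintro ⟨m, hm, hp⟩
          rcases List.mem_append.mp hm with hm | hm
          · rcases List.mem_map.mp hm with ⟨s, _, rfl⟩
            exact absurd (List.cons_prefix_cons.mp hp).1 (Ne.symm h)
          · exact ⟨m, hm, hp⟩

-- B's scan succeeds iff some index keyword occurs as a prefix of some suffix
theorem scanIdx_iff (cs : List Char) :
    scanIdx cs = true ↔ ∃ m ∈ idxKeywords, ∃ j, m <+: cs.drop j := by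
  induction cs with
  | nil =>
      -- every index keyword is nonempty (it is k :: tail), so no match in ""
      simp only [scanIdx, Bool.false_eq_true, false_iff]
      rintro ⟨m, hm, j, hp⟩
      rcases List.mem_flatMap.mp hm with ⟨q, _, hmq⟩
      rcases List.mem_map.mp hmq with ⟨s, _, rfl⟩
      simp at hp
  | cons c t ih =>
      simp only [scanIdx, Bool.or_eq_true, ih,
        lookup_any_iff skipIndex (by decide) c t]
      constructor
      · rintro (⟨m, hm, hp⟩ | ⟨m, hm, j, hp⟩)
        · exact ⟨m, hm, 0, by simpa using hp⟩
        · exact ⟨m, hm, j + 1, by simpa using hp⟩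
      · rintro ⟨m, hm, j, hp⟩
        cases j with
        | zero => exact Or.inl ⟨m, hm, by simpa using hp⟩
        | succ j => exact Or.inr ⟨m, hm, j, by simpa using hp⟩

-- ===== VERDICT (by name: the statement is the Claim_ definition above) =====
theorem is_non_clinical_spec : Claim_equal_is_non_clinical := by
  intro text _
  unfold Spec_is_non_clinical is_non_clinical is_non_clinical_alt
  rcases hA : skipKeywords.any (fun m => PySem.Str.isIn m (PySem.Str.lower text)) with _ | _
  · symm
    rw [Bool.eq_false_iff]
    intro hs
    rcases (scanIdx_iff _).mp hs with ⟨m, hm, j, hp⟩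
    have hm' : m ∈ skipKeywords.map String.toList := idxKeywords_perm.mem_iff.mp hm
    rcases List.mem_map.mp hm' with ⟨s, hsmem, rfl⟩
    have hIn : PySem.Chars.isIn s.toList (PySem.Chars.lower text.toList) = true :=
      (PySem.Chars.exists_prefix_drop_iff_isIn _ _).mp ⟨j, hp⟩
    have hbridge : PySem.Str.isIn s (PySem.Str.lower text)
        = PySem.Chars.isIn s.toList (PySem.Chars.lower text.toList) := by
      rw [PySem.Str.isIn_eq, PySem.Str.toList_lower]
    have hAny : skipKeywords.any (fun m => PySem.Str.isIn m (PySem.Str.lower text)) = true :=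
      List.any_eq_true.mpr ⟨s, hsmem, hbridge ▸ hIn⟩
    exact absurd (hA ▸ hAny) Bool.false_ne_true
  · rw [List.any_eq_true] at hA
    rcases hA with ⟨s, hsmem, hIn⟩
    have hIn' : PySem.Chars.isIn s.toList (PySem.Chars.lower text.toList) = true := by
      rw [← PySem.Str.toList_lower, ← PySem.Str.isIn_eq]
      exact hIn
    rcases (PySem.Chars.exists_prefix_drop_iff_isIn _ _).mpr hIn' with ⟨j, hp⟩
    exact ((scanIdx_iff _).mpr
      ⟨s.toList, idxKeywords_perm.mem_iff.mpr (List.mem_map.mpr ⟨s, hsmem, rfl⟩), j, hp⟩).symm
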